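-- pv_equiv track=rewrite | github.com/nicolas-lair/AidMe | src/UserGrammar/generator.py | _cleanup_end
-- ===== SOURCE A (Python) =====
-- def _cleanup_end(l):
--     end = False
--     count = 0
--     while len(l) > 0 and not end:
--         e = l[len(l) - 1]
--         if e == " " or (len(e) == 1 and not e.isalnum()):
--             count = count + 1
--             del l[len(l) - 1]
--         else:
--             end = True
--     return count
-- ===== SOURCE B (Python) =====
-- def _cleanup_end(l):
--     # Scan backward without mutating, then one bulk deletion; returns the count.
--     count = 0
--     for e in reversed(l):
--         if e == " " or (len(e) == 1 and not e.isalnum()):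
--             count += 1
--         else:
--             break
--     del l[len(l) - count:]
--     return count
-- ===== Notes on version B (the rewrite author's own statement) =====
-- stated objective: simpler
-- what changed: B replaces A's flag-driven while loop that deletes the last element one at a time with a non-mutating backward scan (for e in reversed(l) with break) followed by a single bulk slice deletion.
import Mathlib
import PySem

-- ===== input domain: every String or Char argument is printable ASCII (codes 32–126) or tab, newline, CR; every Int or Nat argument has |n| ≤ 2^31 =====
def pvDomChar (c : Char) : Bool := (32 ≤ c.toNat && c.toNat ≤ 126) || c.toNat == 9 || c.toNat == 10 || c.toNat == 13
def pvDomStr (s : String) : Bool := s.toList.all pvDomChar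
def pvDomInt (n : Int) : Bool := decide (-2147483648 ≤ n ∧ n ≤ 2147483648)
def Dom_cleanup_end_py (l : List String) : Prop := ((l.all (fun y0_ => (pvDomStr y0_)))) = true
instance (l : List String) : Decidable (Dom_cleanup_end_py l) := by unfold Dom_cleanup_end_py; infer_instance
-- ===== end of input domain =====

-- ===== PORT A =====
-- B changes only the decomposition (backward scan + one bulk delete instead of per-element
-- deletes in a flag-driven while loop); the return value is proved equal. A mutates its
-- argument in place (B performs the same net mutation); the equivalence proved here is
-- about the RETURN value only.

-- the trailing-junk test shared by both Pythons: e == " " or (len(e) == 1 and not e.isalnum())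
def pvJunk (e : String) : Bool :=
  e == " " || (PySem.Str.len e == 1 && !(PySem.Str.strIsalnum e))

-- A's while loop: state is (l, count); each deleting step drops the last element.
def cleanupEndLoopA (l : List String) (count : Int) : Int :=
  if h : 0 < l.length then
    let e := l.getLast (List.ne_nil_of_length_pos h)
    if pvJunk e then cleanupEndLoopA l.dropLast (count + 1)
    else count
  else count
termination_by l.length
decreasing_by simpa [List.length_dropLast] using Nat.sub_lt h Nat.one_pos

def cleanup_end_py (l : List String) : Int := cleanupEndLoopA l 0

-- ===== PORT B =====
-- B's for-loop over reversed(l) with break, accumulating count (the bulk deletion does not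
-- affect the returned value).
def cleanupEndScanB (r : List String) (count : Int) : Int :=
  match r with
  | [] => count
  | e :: rest => if pvJunk e then cleanupEndScanB rest (count + 1) else count

def cleanup_end_py_alt (l : List String) : Int := cleanupEndScanB l.reverse 0

-- ===== PRECONDITION & SPEC =====
def Spec_cleanup_end_py (l : List String) (out : Int) : Prop := out = cleanup_end_py_alt l
instance (l : List String) (out : Int) : Decidable (Spec_cleanup_end_py l out) := by unfold Spec_cleanup_end_py; infer_instance

-- ===== CLAIM (what is proved, stated in full; the proofs are below) =====
def Claim_equal_cleanup_end_py : Prop := ∀ (l : List String), Dom_cleanup_end_py l → Spec_cleanup_end_py l (cleanup_end_py l)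

-- ===== LEMMAS AND PROOFS =====
theorem loopA_eq_scanB (r : List String) (count : Int) :
    cleanupEndLoopA r.reverse count = cleanupEndScanB r count := by
  induction r generalizing count with
  | nil => simp [cleanupEndLoopA, cleanupEndScanB]
  | cons e rest ih =>
    rw [cleanupEndLoopA, cleanupEndScanB]
    have hlen : 0 < (e :: rest).reverse.length := by simp
    rw [dif_pos hlen]
    have hlast : (e :: rest).reverse.getLast (List.ne_nil_of_length_pos hlen) = e := by
      simp [List.reverse_cons]
    have hdrop : (e :: rest).reverse.dropLast = rest.reverse := by
      simp [List.reverse_cons]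
    simp only [hlast, hdrop]
    split
    · exact ih (count + 1)
    · rfl

-- ===== VERDICT (by name: the statement is the Claim_ definition above) =====
theorem cleanup_end_py_spec : Claim_equal_cleanup_end_py := by
  intro l _
  unfold Spec_cleanup_end_py cleanup_end_py cleanup_end_py_alt
  have := loopA_eq_scanB l.reverse 0
  simpa using this
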